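-- pv_equiv track=rewrite | github.com/WSm-77/WDI | set3/15.py | solution
-- ===== SOURCE A (Python) =====
-- from math import isqrt
--
-- def isPrime(number):
--     if number == 2:
--         return True
--     elif number < 2 or number % 2 == 0:
--         return False
--     else:
--         div = 3
--         iroot = isqrt(number)
--         while div <= iroot:
--             if number % div == 0:
--                 return False
--             else:
--                 div += 2
--             #end if
--         #end while
--         return True
--
-- def solution(numArray):
--     result = False
--     n = len(numArray)
--     fib1, fib2 = 1, 2
--     for i in range(n):
--         currentNumber = numArray[i]
--         if i == fib1:
--             if isPrime(currentNumber) or currentNumber < 2: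
--                 result = False
--                 break
--             #end if
--
--             fib1, fib2 = fib2, fib1 + fib2
--         #end if
--         else:
--             if isPrime(currentNumber):
--                 result = True
--             #end if
--         #end if
--     #end for
--     return result
-- ===== SOURCE B (Python) =====
-- from math import isqrt
--
-- def isPrime(number):
--     if number == 2:
--         return True
--     elif number < 2 or number % 2 == 0:
--         return False
--     else:
--         div = 3
--         iroot = isqrt(number)
--         while div <= iroot:
--             if number % div == 0:
--                 return False
--             else:
--                 div += 2
--         return True
--
-- def solution(numArray):
--     n = len(numArray)
--     fibs = []
--     a, b = 1, 2
--     while a < n: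
--         fibs.append(a)
--         a, b = b, a + b
--     if any(isPrime(numArray[i]) or numArray[i] < 2 for i in fibs):
--         return False
--     return any(isPrime(numArray[i]) for i in range(n) if i not in fibs)
-- ===== Notes on version B (the rewrite author's own statement) =====
-- stated objective: simpler
-- what changed: A's single intertwined index loop with a mutable Fibonacci pair, a result flag and a break is decomposed into building the list of Fibonacci indices below n once and then two independent any-passes: return False if any fib-index value is prime or < 2, else report whether any non-fib-index value is prime.
import Mathlib
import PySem

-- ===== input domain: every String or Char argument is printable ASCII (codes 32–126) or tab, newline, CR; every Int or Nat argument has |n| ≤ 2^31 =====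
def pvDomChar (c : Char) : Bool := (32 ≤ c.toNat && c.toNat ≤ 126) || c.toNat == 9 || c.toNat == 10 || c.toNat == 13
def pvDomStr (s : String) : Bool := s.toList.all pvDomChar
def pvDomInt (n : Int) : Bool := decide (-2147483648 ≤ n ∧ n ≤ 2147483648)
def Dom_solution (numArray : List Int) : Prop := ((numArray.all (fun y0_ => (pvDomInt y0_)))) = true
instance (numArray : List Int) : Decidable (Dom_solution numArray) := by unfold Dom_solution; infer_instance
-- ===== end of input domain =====

-- B replaces A's single loop-with-break by first building the list of Fibonacci indices below n
-- and then two separate any-passes (fib-index check, then non-fib primality scan); objective: simpler decomposition.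

-- ===== PORT A =====
-- shared helper: both Pythons contain the identical isPrime; its while loop
-- (div = 3, 5, ... while div <= isqrt(number)) is primeLoop.
def primeLoop (number iroot div : Int) : Bool :=
  if h : div ≤ iroot then
    if PySem.Int.mod number div == 0 then false
    else primeLoop number iroot (div + 2)
  else true
termination_by (iroot + 1 - div).toNat
decreasing_by omega
def isPrime (number : Int) : Bool :=
  if number == 2 then true
  else if number < 2 || PySem.Int.mod number 2 == 0 then false
  else primeLoop number ((Nat.sqrt number.toNat : Nat) : Int) 3
def loopA : List Int → Int → Int → Int → Bool → Bool
  | [], _, _, _, result => result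
  | currentNumber :: rest, i, fib1, fib2, result =>
    if i == fib1 then
      if isPrime currentNumber || currentNumber < 2 then false
      else loopA rest (i + 1) fib2 (fib1 + fib2) result
    else loopA rest (i + 1) fib1 fib2 (if isPrime currentNumber then true else result)

def solution (numArray : List Int) : Bool :=
  loopA numArray 0 1 2 false

-- ===== PORT B =====
-- while a < n: fibs.append(a); a, b = b, a + b   (the a < b conjunct is a
-- totality guard only: it holds at every call reached from (1, 2))
def fibsBelow (a b n : Int) : List Int :=
  if _h : a < b ∧ a < n then a :: fibsBelow b (a + b) n else []
termination_by (n - a).toNat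
decreasing_by omega

def solution_alt (numArray : List Int) : Bool :=
  let n : Int := numArray.length
  let fibs := fibsBelow 1 2 n
  if fibs.any (fun i => isPrime (PySem.List.pyGetD numArray i 0) || PySem.List.pyGetD numArray i 0 < 2) then false
  else ((PySem.List.pyRange 0 n 1).filter (fun i => !(fibs.contains i))).any
         (fun i => isPrime (PySem.List.pyGetD numArray i 0))

-- ===== PRECONDITION & SPEC =====
def Spec_solution (numArray : List Int) (out : Bool) : Prop := out = solution_alt numArray
instance (numArray : List Int) (out : Bool) : Decidable (Spec_solution numArray out) := by unfold Spec_solution; infer_instance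

-- ===== CLAIM (what is proved, stated in full; the proofs are below) =====
def Claim_equal_solution : Prop := ∀ (numArray : List Int), Dom_solution numArray → Spec_solution numArray (solution numArray)

-- ===== LEMMAS AND PROOFS =====

theorem fibsBelow_ge (a b n : Int) : ∀ j ∈ fibsBelow a b n, a ≤ j := by
  fun_induction fibsBelow
  case case1 h ih =>
    intro j hj
    rcases List.mem_cons.mp hj with rfl | hj
    · exact le_refl _
    · exact le_trans (le_of_lt h.1) (ih j hj)
  case case2 => simp

theorem fibsBelow_nil (a b n : Int) (h : n ≤ a) : fibsBelow a b n = [] := by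
  rw [fibsBelow]; simp; omega

theorem fibsBelow_cons (a b n : Int) (h1 : a < b) (h2 : a < n) :
    fibsBelow a b n = a :: fibsBelow b (a + b) n := by
  rw [fibsBelow]; simp [h1, h2]

theorem pyGetD_cons_shift (x : Int) (t : List Int) (k : Int) (hk : 1 ≤ k) :
    PySem.List.pyGetD (x :: t) k 0 = PySem.List.pyGetD t (k - 1) 0 := by
  obtain ⟨m, rfl⟩ : ∃ m : Nat, k = ((m + 1 : Nat) : Int) := ⟨(k - 1).toNat, by omega⟩
  rw [show ((m + 1 : Nat) : Int) - 1 = ((m : Nat) : Int) from by push_cast; ring,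
    PySem.List.pyGetD_natCast, PySem.List.pyGetD_natCast]
  simp [List.getD]

theorem any_congr_mem (l : List Int) (f g : Int → Bool) (h : ∀ x ∈ l, f x = g x) :
    l.any f = l.any g := by
  induction l with
  | nil => rfl
  | cons x t ih =>
    simp only [List.any_cons, h x (List.mem_cons_self),
      ih (fun y hy => h y (List.mem_cons_of_mem _ hy))]

theorem loopA_eq (rest : List Int) : ∀ (i a b : Int) (r : Bool), 0 < a → i ≤ a → a < b →
    loopA rest i a b r =
      (if (fibsBelow a b (i + rest.length)).any
            (fun j => isPrime (PySem.List.pyGetD rest (j - i) 0) || PySem.List.pyGetD rest (j - i) 0 < 2)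
       then false
       else r || ((PySem.List.pyRange i (i + rest.length) 1).filter
                    (fun j => !((fibsBelow a b (i + rest.length)).contains j))).any
                  (fun j => isPrime (PySem.List.pyGetD rest (j - i) 0))) := by
  induction rest with
  | nil =>
    intro i a b r ha hia hab
    simp [loopA, fibsBelow_nil a b i hia, PySem.List.pyRange_one_eq_nil (le_refl i)]
  | cons x t ih =>
    intro i a b r ha hia hab
    have hn : i + (((x :: t).length : Nat) : Int) = (i + 1) + (t.length : Int) := by
      simp [List.length_cons]; ring
    rw [hn]
    have hiltn : i < i + 1 + (t.length : Int) := by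
      have := Int.natCast_nonneg t.length; omega
    by_cases hia2 : i = a
    · subst hia2
      rw [fibsBelow_cons i b _ hab hiltn]
      have hx0 : PySem.List.pyGetD (x :: t) (i - i) 0 = x := by
        simp [PySem.List.pyGetD_zero_cons]
      by_cases hfail : (isPrime x || x < 2) = true
      · simp only [loopA, BEq.rfl, if_true, hfail, List.any_cons, hx0]
        simp
      · have hcond : (isPrime x || decide (x < 2)) = false := by simpa using hfail
        have hLHS : loopA (x :: t) i i b r = loopA t (i + 1) b (i + b) r := by
          simp only [loopA, BEq.rfl, if_true, hcond, Bool.false_eq_true, if_false]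
        rw [hLHS, ih (i + 1) b (i + b) r (by omega) (by omega) (by omega)]
        have hC : (i :: fibsBelow b (i + b) (i + 1 + (t.length : Int))).any
              (fun j => isPrime (PySem.List.pyGetD (x :: t) (j - i) 0) || PySem.List.pyGetD (x :: t) (j - i) 0 < 2)
            = (fibsBelow b (i + b) (i + 1 + (t.length : Int))).any
              (fun j => isPrime (PySem.List.pyGetD t (j - (i + 1)) 0) || PySem.List.pyGetD t (j - (i + 1)) 0 < 2) := by
          rw [List.any_cons]
          have h0 : (isPrime (PySem.List.pyGetD (x :: t) (i - i) 0) ||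
              decide (PySem.List.pyGetD (x :: t) (i - i) 0 < 2)) = false := by
            rw [hx0]; simpa using hfail
          rw [h0, Bool.false_or]
          apply any_congr_mem
          intro j hj
          have hbj : b ≤ j := fibsBelow_ge _ _ _ j hj
          have hsh := pyGetD_cons_shift x t (j - i) (by omega)
          simp only [hsh, show j - i - 1 = j - (i + 1) from by ring]
        have hA : ((PySem.List.pyRange i (i + 1 + (t.length : Int)) 1).filter
              (fun j => !((i :: fibsBelow b (i + b) (i + 1 + (t.length : Int))).contains j))).any
              (fun j => isPrime (PySem.List.pyGetD (x :: t) (j - i) 0))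
            = ((PySem.List.pyRange (i + 1) (i + 1 + (t.length : Int)) 1).filter
              (fun j => !((fibsBelow b (i + b) (i + 1 + (t.length : Int))).contains j))).any
              (fun j => isPrime (PySem.List.pyGetD t (j - (i + 1)) 0)) := by
          rw [PySem.List.pyRange_one_cons hiltn, List.filter_cons]
          rw [show (!((i :: fibsBelow b (i + b) (i + 1 + (t.length : Int))).contains i)) = false from by simp]
          simp only [Bool.false_eq_true, if_false]
          rw [List.filter_congr (q := fun j => !((fibsBelow b (i + b) (i + 1 + (t.length : Int))).contains j))
            (fun j hj => by
              have hij : i + 1 ≤ j := (PySem.List.mem_pyRange_one.mp hj).1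
              simp only [List.contains_cons, Bool.not_or]
              rw [show (j == i) = false from by simp; omega]
              simp)]
          apply any_congr_mem
          intro j hj
          have hij : i + 1 ≤ j := (PySem.List.mem_pyRange_one.mp (List.mem_of_mem_filter hj)).1
          have hsh := pyGetD_cons_shift x t (j - i) (by omega)
          simp only [hsh, show j - i - 1 = j - (i + 1) from by ring]
        rw [hC, hA]
    · have hne : (i == a) = false := by simpa using hia2
      have hLHS : loopA (x :: t) i a b r
          = loopA t (i + 1) a b (if isPrime x then true else r) := by
        simp only [loopA, hne, Bool.false_eq_true, if_false]
      rw [hLHS, ih (i + 1) a b _ ha (by omega) hab]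
      have hnotmem : i ∉ fibsBelow a b (i + 1 + (t.length : Int)) := fun h =>
        absurd (fibsBelow_ge _ _ _ i h) (by omega)
      have hC : (fibsBelow a b (i + 1 + (t.length : Int))).any
            (fun j => isPrime (PySem.List.pyGetD (x :: t) (j - i) 0) || PySem.List.pyGetD (x :: t) (j - i) 0 < 2)
          = (fibsBelow a b (i + 1 + (t.length : Int))).any
            (fun j => isPrime (PySem.List.pyGetD t (j - (i + 1)) 0) || PySem.List.pyGetD t (j - (i + 1)) 0 < 2) := by
        apply any_congr_mem
        intro j hj
        have haj : a ≤ j := fibsBelow_ge _ _ _ j hj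
        have hsh := pyGetD_cons_shift x t (j - i) (by omega)
        simp only [hsh, show j - i - 1 = j - (i + 1) from by ring]
      have hA : ((PySem.List.pyRange i (i + 1 + (t.length : Int)) 1).filter
            (fun j => !((fibsBelow a b (i + 1 + (t.length : Int))).contains j))).any
            (fun j => isPrime (PySem.List.pyGetD (x :: t) (j - i) 0))
          = (isPrime x || ((PySem.List.pyRange (i + 1) (i + 1 + (t.length : Int)) 1).filter
            (fun j => !((fibsBelow a b (i + 1 + (t.length : Int))).contains j))).any
            (fun j => isPrime (PySem.List.pyGetD t (j - (i + 1)) 0))) := by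
        rw [PySem.List.pyRange_one_cons hiltn, List.filter_cons]
        rw [show (!((fibsBelow a b (i + 1 + (t.length : Int))).contains i)) = true from by
          simpa using hnotmem]
        simp only [if_true, List.any_cons]
        have hx0 : PySem.List.pyGetD (x :: t) (i - i) 0 = x := by
          simp [PySem.List.pyGetD_zero_cons]
        rw [hx0]
        congr 1
        apply any_congr_mem
        intro j hj
        have hij : i + 1 ≤ j := (PySem.List.mem_pyRange_one.mp (List.mem_of_mem_filter hj)).1
        have hsh := pyGetD_cons_shift x t (j - i) (by omega)
        simp only [hsh, show j - i - 1 = j - (i + 1) from by ring]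
      rw [hC, hA]
      by_cases hpx : isPrime x = true
      · simp [hpx]
      · rw [show isPrime x = false from by simpa using hpx]
        simp

-- ===== VERDICT (by name: the statement is the Claim_ definition above) =====
theorem solution_spec : Claim_equal_solution := by
  intro numArray _
  show solution numArray = solution_alt numArray
  unfold solution solution_alt
  rw [loopA_eq numArray 0 1 2 false (by omega) (by omega) (by omega)]
  simp only [zero_add, sub_zero, Bool.false_or]
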